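-- pv_equiv track=rewrite | github.com/Forest-Y/AtCoder | 110~119/ABC114/755.py | judge_753
-- ===== SOURCE A (Python) =====
-- from collections import defaultdict as dic
--
-- def judge_753(s):
--     judge = 1
--     flag = dic(int)
--     for i in range(len(s)):
--         if s[i] != '7' and s[i] != '5' and s[i] != '3':
--             judge = 0
--             break
--         else:
--             flag[int(s[i])] = 1
--
--     if flag[3] != 1 or flag[5] != 1 or flag[7] != 1:
--         judge = 0
--     return judge
-- ===== SOURCE B (Python) =====
-- def judge_753(s):
--     c3, c5, c7 = s.count('3'), s.count('5'), s.count('7')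
--     return int(c3 > 0 and c5 > 0 and c7 > 0 and c3 + c5 + c7 == len(s))
-- ===== Notes on version B (the rewrite author's own statement) =====
-- stated objective: alternative
-- what changed: Replaces the per-character loop with early break and the defaultdict presence flags by three str.count library passes plus arithmetic: the string is valid iff the counts of the digits 3, 5 and 7 are each positive and together add up to the length of s, so no per-character control flow or flag state remains.
import Mathlib
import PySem

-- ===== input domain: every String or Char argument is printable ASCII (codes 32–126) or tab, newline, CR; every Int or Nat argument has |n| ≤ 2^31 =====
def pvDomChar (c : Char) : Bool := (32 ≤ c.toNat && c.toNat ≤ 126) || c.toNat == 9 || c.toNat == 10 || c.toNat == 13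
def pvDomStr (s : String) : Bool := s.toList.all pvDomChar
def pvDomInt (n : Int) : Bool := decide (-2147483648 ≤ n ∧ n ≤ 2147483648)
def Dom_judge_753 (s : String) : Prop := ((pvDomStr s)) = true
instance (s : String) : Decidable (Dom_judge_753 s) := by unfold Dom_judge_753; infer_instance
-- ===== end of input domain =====

-- B drops A's per-character loop with early break and its defaultdict presence flags, and instead
-- takes three str.count passes: the three counts are positive and sum to len(s) (objective: simpler).

-- ===== PORT A =====
-- A's for-loop with early break, carrying the flag dict; int(s[i]) on the current char
def judgeLoopA : List Char → PySem.Dict Int Int → Int × PySem.Dict Int Int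
  | [], flag => (1, flag)
  | c :: rest, flag =>
    if c ≠ '7' ∧ c ≠ '5' ∧ c ≠ '3' then (0, flag)
    else judgeLoopA rest (flag.insert ((PySem.Int.ofStr? (String.ofList [c])).getD 0) 1)

def judge_753 (s : String) : Int :=
  let r := judgeLoopA s.toList PySem.Dict.empty
  if r.2.getD 3 0 ≠ 1 ∨ r.2.getD 5 0 ≠ 1 ∨ r.2.getD 7 0 ≠ 1 then 0 else r.1

-- ===== PORT B =====
def judge_753_alt (s : String) : Int :=
  let c3 := PySem.Str.count s "3"
  let c5 := PySem.Str.count s "5"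
  let c7 := PySem.Str.count s "7"
  if 0 < c3 ∧ 0 < c5 ∧ 0 < c7 ∧ ((c3 + c5 + c7 : Nat) : Int) = PySem.Str.len s then 1 else 0

-- ===== PRECONDITION & SPEC =====
def Spec_judge_753 (s : String) (out : Int) : Prop := out = judge_753_alt s
instance (s : String) (out : Int) : Decidable (Spec_judge_753 s out) := by unfold Spec_judge_753; infer_instance

-- ===== CLAIM (what is proved, stated in full; the proofs are below) =====
def Claim_equal_judge_753 : Prop := ∀ (s : String), Dom_judge_753 s → Spec_judge_753 s (judge_753 s)

-- ===== LEMMAS AND PROOFS =====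

theorem pvOfStr3 : (PySem.Int.ofStr? "3").getD 0 = 3 := by decide
theorem pvOfStr5 : (PySem.Int.ofStr? "5").getD 0 = 5 := by decide
theorem pvOfStr7 : (PySem.Int.ofStr? "7").getD 0 = 7 := by decide

-- the loop's judge component: 1 iff every char is 3/5/7 (independent of the dict)
theorem judgeLoopA_fst (l : List Char) (d : PySem.Dict Int Int) :
    (judgeLoopA l d).1 = if ∀ c ∈ l, c = '3' ∨ c = '5' ∨ c = '7' then 1 else 0 := by
  induction l generalizing d with
  | nil => simp [judgeLoopA]
  | cons c rest ih =>
    by_cases h : c ≠ '7' ∧ c ≠ '5' ∧ c ≠ '3'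
    · simp only [judgeLoopA, if_pos h]
      rw [if_neg]
      rw [List.forall_mem_cons]
      tauto
    · simp only [judgeLoopA, if_neg h, ih]
      congr 1
      rw [eq_iff_iff, List.forall_mem_cons]
      constructor
      · tauto
      · intro hx; exact hx.2

-- the flag dict after the loop, when no break occurs: key k∈{3,5,7} is 1 iff its digit occurred
theorem judgeLoopA_getD (l : List Char) (d : PySem.Dict Int Int) (k : Int) (dc : Char)
    (hk : (k, dc) ∈ [((3 : Int), '3'), (5, '5'), (7, '7')])
    (hall : ∀ c ∈ l, c = '3' ∨ c = '5' ∨ c = '7') :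
    (judgeLoopA l d).2.getD k 0 = if dc ∈ l then 1 else d.getD k 0 := by
  simp only [List.mem_cons, List.not_mem_nil, or_false, Prod.mk.injEq] at hk
  induction l generalizing d with
  | nil => simp [judgeLoopA]
  | cons c rest ih =>
    have hc : c = '3' ∨ c = '5' ∨ c = '7' := hall c (List.mem_cons_self)
    have hne : ¬ (c ≠ '7' ∧ c ≠ '5' ∧ c ≠ '3') := by tauto
    simp only [judgeLoopA, if_neg hne]
    rw [ih _ (fun x hx => hall x (List.mem_cons_of_mem _ hx))]
    by_cases hmem : dc ∈ rest
    · simp [hmem]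
    · simp only [List.mem_cons, hmem, or_false]
      obtain ⟨rfl, rfl⟩ | ⟨rfl, rfl⟩ | ⟨rfl, rfl⟩ := hk <;>
        rcases hc with rfl | rfl | rfl <;>
        simp [PySem.Dict.getD_insert, pvOfStr3, pvOfStr5, pvOfStr7] <;>
        decide

theorem judge_753_eq (s : String) :
    judge_753 s = if (∀ c ∈ s.toList, c = '3' ∨ c = '5' ∨ c = '7')
        ∧ '3' ∈ s.toList ∧ '5' ∈ s.toList ∧ '7' ∈ s.toList then 1 else 0 := by
  show (if (judgeLoopA s.toList PySem.Dict.empty).2.getD 3 0 ≠ 1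
          ∨ (judgeLoopA s.toList PySem.Dict.empty).2.getD 5 0 ≠ 1
          ∨ (judgeLoopA s.toList PySem.Dict.empty).2.getD 7 0 ≠ 1 then 0
        else (judgeLoopA s.toList PySem.Dict.empty).1) = _
  generalize s.toList = l
  by_cases hall : ∀ c ∈ l, c = '3' ∨ c = '5' ∨ c = '7'
  · rw [judgeLoopA_getD l PySem.Dict.empty 3 '3' (by simp) hall,
      judgeLoopA_getD l PySem.Dict.empty 5 '5' (by simp) hall,
      judgeLoopA_getD l PySem.Dict.empty 7 '7' (by simp) hall,
      judgeLoopA_fst, if_pos hall]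
    have he3 : (PySem.Dict.empty : PySem.Dict Int Int).getD 3 0 = 0 := by decide
    have he5 : (PySem.Dict.empty : PySem.Dict Int Int).getD 5 0 = 0 := by decide
    have he7 : (PySem.Dict.empty : PySem.Dict Int Int).getD 7 0 = 0 := by decide
    by_cases h3 : '3' ∈ l <;> by_cases h5 : '5' ∈ l <;> by_cases h7 : '7' ∈ l <;>
      simp [h3, h5, h7, he3, he5, he7] <;>
      (intro x hx; rcases hall x hx with rfl | rfl | rfl <;> simp)
  · rw [judgeLoopA_fst, if_neg hall,
      if_neg (show ¬ ((∀ c ∈ l, c = '3' ∨ c = '5' ∨ c = '7') ∧ _ ∧ _ ∧ _) from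
        fun h => hall h.1), ite_self]

-- s.count(c) for a single character c is List.count on the code points
theorem countGo_singleton (c : Char) (l : List Char) (fuel acc : Nat)
    (hf : l.length ≤ fuel) :
    PySem.Chars.count.go [c] fuel l acc = acc + l.count c := by
  induction l generalizing fuel acc with
  | nil => cases fuel <;> simp [PySem.Chars.count.go]
  | cons h t ih =>
    cases fuel with
    | zero => simp at hf
    | succ n =>
      have hf' : t.length ≤ n := by simpa using hf
      by_cases hc : c = h
      · subst hc
        simp [PySem.Chars.count.go, List.isPrefixOf, ih _ _ hf', List.count_cons]
        omega
      · have : ([c].isPrefixOf (h :: t)) = false := by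
          simp [List.isPrefixOf]; exact fun hh => hc (by simpa using hh)
        simp [PySem.Chars.count.go, this, ih _ _ hf', List.count_cons,
          (by simpa [eq_comm] using hc : ¬ h = c)]

theorem count_singleton (l : List Char) (c : Char) :
    PySem.Chars.count l [c] = l.count c := by
  simp [PySem.Chars.count, countGo_singleton c l l.length 0 le_rfl]

-- counts of the three disjoint characters sum to countP of the disjunction
theorem sum_three_counts (l : List Char) :
    l.count '3' + l.count '5' + l.count '7'
      = l.countP (fun c => c == '3' || c == '5' || c == '7') := by
  induction l with
  | nil => simp
  | cons c t ih =>
    rw [List.count_cons, List.count_cons, List.count_cons, List.countP_cons]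
    by_cases h3 : c = '3'
    · subst h3; simp [ih]; omega
    by_cases h5 : c = '5'
    · subst h5; simp [ih]; omega
    by_cases h7 : c = '7'
    · subst h7; simp [ih]; omega
    · simp [h3, h5, h7, ih]

theorem alt_eq (s : String) :
    judge_753_alt s = if (∀ c ∈ s.toList, c = '3' ∨ c = '5' ∨ c = '7')
        ∧ '3' ∈ s.toList ∧ '5' ∈ s.toList ∧ '7' ∈ s.toList then 1 else 0 := by
  unfold judge_753_alt
  simp only [PySem.Str.count_eq, PySem.Str.len_eq]
  congr 1
  rw [eq_iff_iff]
  have e3 := count_singleton s.toList '3'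
  have e5 := count_singleton s.toList '5'
  have e7 := count_singleton s.toList '7'
  have hs : "3".toList = ['3'] := by decide
  have hs5 : "5".toList = ['5'] := by decide
  have hs7 : "7".toList = ['7'] := by decide
  rw [hs, hs5, hs7, e3, e5, e7]
  constructor
  · rintro ⟨h3, h5, h7, hlen⟩
    have hsum : s.toList.countP (fun c => c == '3' || c == '5' || c == '7') = s.toList.length := by
      rw [← sum_three_counts]; exact_mod_cast hlen
    refine ⟨fun c hc => ?_, ?_, ?_, ?_⟩
    · have := (List.countP_eq_length).mp hsum c hc
      simpa [or_assoc] using this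
    · exact List.count_pos_iff.mp h3
    · exact List.count_pos_iff.mp h5
    · exact List.count_pos_iff.mp h7
  · rintro ⟨hall, h3, h5, h7⟩
    refine ⟨List.count_pos_iff.mpr h3, List.count_pos_iff.mpr h5,
      List.count_pos_iff.mpr h7, ?_⟩
    have hsum : s.toList.countP (fun c => c == '3' || c == '5' || c == '7') = s.toList.length :=
      List.countP_eq_length.mpr (fun c hc => by simpa [or_assoc] using hall c hc)
    rw [sum_three_counts, hsum]

-- ===== VERDICT (by name: the statement is the Claim_ definition above) =====
theorem judge_753_spec : Claim_equal_judge_753 := by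
  intro s _
  unfold Spec_judge_753
  rw [judge_753_eq, alt_eq]
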